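-- pv_equiv track=rewrite | github.com/awicek/L.I.T.S | Game/PLAYERS/_player.py | vytvor_tvar
-- ===== SOURCE A (Python) =====
-- def vytvor_tvar (pole):
--     barva = pole[0]
--     pole2 = list()
--     for i in range(len(pole[1:])//2):
--         pole2.append([pole[i*2+1], pole[i*2+2]])
--
--     pole2.sort()
--     x_min = pole2[0][0]
--     x_max = pole2[-1][0]
--
--     pole2.sort(key = lambda x: x[1])
--
--     y_min = pole2[0][1]
--     y_max = pole2[-1][1]
--
--     x = x_max - x_min +1
--     y = y_max - y_min +1
--     matice = [[0 for _ in range(y)] for __ in range(x)]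
--
--     for i in pole2:
--         matice[i[0]-x_min][i[1]-y_min] = barva
--     return barva ,len(matice),len(matice[0]),matice
-- ===== SOURCE B (Python) =====
-- def vytvor_tvar(pole):
--     barva = pole[0]
--     pairs = [(pole[i*2+1], pole[i*2+2]) for i in range(len(pole[1:]) // 2)]
--     pts = set(pairs)
--     x_min = min(p[0] for p in pairs)
--     x_max = max(p[0] for p in pairs)
--     y_min = min(p[1] for p in pairs)
--     y_max = max(p[1] for p in pairs)
--     matice = [[barva if (x_min + i, y_min + j) in pts else 0
--                for j in range(y_max - y_min + 1)]
--               for i in range(x_max - x_min + 1)]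
--     return barva, len(matice), len(matice[0]), matice
-- ===== Notes on version B (the rewrite author's own statement) =====
-- stated objective: alternative
-- what changed: B replaces A's double sort + scatter writes into a preallocated zero matrix by computing the bounding box with min/max over the coordinate list and building the matrix in one gather pass: a nested comprehension over the whole box testing each cell's membership in a set of the points.
-- outside the precondition, e.g. on vytvor_tvar([0]): A raises IndexError, B raises ValueError
import Mathlib
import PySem

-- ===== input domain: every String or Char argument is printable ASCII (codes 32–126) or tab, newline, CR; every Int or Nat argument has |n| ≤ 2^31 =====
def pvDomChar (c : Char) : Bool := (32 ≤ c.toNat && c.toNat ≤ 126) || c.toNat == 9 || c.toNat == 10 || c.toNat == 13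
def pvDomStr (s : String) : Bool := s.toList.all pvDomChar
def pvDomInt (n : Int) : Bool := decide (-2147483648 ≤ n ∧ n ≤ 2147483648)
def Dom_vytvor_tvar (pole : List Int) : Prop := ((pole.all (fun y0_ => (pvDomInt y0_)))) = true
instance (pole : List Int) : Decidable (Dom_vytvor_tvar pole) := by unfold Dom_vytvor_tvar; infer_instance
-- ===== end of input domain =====

-- B builds the shape matrix by a gather pass (membership of each bounding-box cell in a set of
-- the points, extremes by min/max) instead of A's double sort + scatter writes into a zero matrix.

-- ===== PORT A =====
-- the pair-collecting loop: for i in range(len(pole[1:])//2): pole2.append([pole[i*2+1], pole[i*2+2]])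
def pvA_pairs (pole : List Int) : List (Int × Int) :=
  (PySem.List.pyRange 0
      (PySem.Int.floordiv (PySem.List.len (PySem.List.slice pole (some 1) none)) 2) 1).foldl
    (fun acc i =>
      acc ++ [(PySem.List.pyGetD pole (i * 2 + 1) 0, PySem.List.pyGetD pole (i * 2 + 2) 0)]) []

-- pole2.sort()  (lists of length 2 compare lexicographically = tuple key (x[0], x[1]))
def pvA_s1 (pole : List Int) : List (Int × Int) :=
  PySem.List.sorted2 (pvA_pairs pole) (fun p => p.1) (fun p => p.2)

def pvA_xmin (pole : List Int) : Int := (PySem.List.pyGetD (pvA_s1 pole) 0 (0, 0)).1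
def pvA_xmax (pole : List Int) : Int := (PySem.List.pyGetD (pvA_s1 pole) (-1) (0, 0)).1

-- pole2.sort(key = lambda x: x[1])  (stable, applied to the already lex-sorted list)
def pvA_s2 (pole : List Int) : List (Int × Int) :=
  PySem.List.sorted (pvA_s1 pole) (fun p => p.2)

def pvA_ymin (pole : List Int) : Int := (PySem.List.pyGetD (pvA_s2 pole) 0 (0, 0)).2
def pvA_ymax (pole : List Int) : Int := (PySem.List.pyGetD (pvA_s2 pole) (-1) (0, 0)).2

-- matice = [[0 for _ in range(y)] for __ in range(x)]
def pvA_mat0 (pole : List Int) : List (List Int) :=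
  (PySem.List.pyRange 0 (pvA_xmax pole - pvA_xmin pole + 1) 1).map (fun _ =>
    (PySem.List.pyRange 0 (pvA_ymax pole - pvA_ymin pole + 1) 1).map (fun _ => (0 : Int)))

-- for i in pole2: matice[i[0]-x_min][i[1]-y_min] = barva
def pvA_mat (pole : List Int) : List (List Int) :=
  (pvA_s2 pole).foldl (fun m p =>
    PySem.List.pySetD m (p.1 - pvA_xmin pole)
      (PySem.List.pySetD (PySem.List.pyGetD m (p.1 - pvA_xmin pole) []) (p.2 - pvA_ymin pole)
        (PySem.List.pyGetD pole 0 0))) (pvA_mat0 pole)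

def vytvor_tvar (pole : List Int) : Int × Int × Int × List (List Int) :=
  (PySem.List.pyGetD pole 0 0, PySem.List.len (pvA_mat pole),
   PySem.List.len (PySem.List.pyGetD (pvA_mat pole) 0 []), pvA_mat pole)

-- ===== PORT B =====
-- pairs = [(pole[i*2+1], pole[i*2+2]) for i in range(len(pole[1:]) // 2)]
def pvB_pairs (pole : List Int) : List (Int × Int) :=
  (PySem.List.pyRange 0
      (PySem.Int.floordiv (PySem.List.len (PySem.List.slice pole (some 1) none)) 2) 1).map
    (fun i => (PySem.List.pyGetD pole (i * 2 + 1) 0, PySem.List.pyGetD pole (i * 2 + 2) 0))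

def pvB_xmin (pole : List Int) : Int :=
  ((PySem.List.min? ((pvB_pairs pole).map (fun p => p.1)) (fun v => v)).getD 0)
def pvB_xmax (pole : List Int) : Int :=
  ((PySem.List.max? ((pvB_pairs pole).map (fun p => p.1)) (fun v => v)).getD 0)
def pvB_ymin (pole : List Int) : Int :=
  ((PySem.List.min? ((pvB_pairs pole).map (fun p => p.2)) (fun v => v)).getD 0)
def pvB_ymax (pole : List Int) : Int :=
  ((PySem.List.max? ((pvB_pairs pole).map (fun p => p.2)) (fun v => v)).getD 0)

-- matice = [[barva if (x_min+i, y_min+j) in pts else 0 for j in range(y)] for i in range(x)]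
def pvB_mat (pole : List Int) : List (List Int) :=
  (PySem.List.pyRange 0 (pvB_xmax pole - pvB_xmin pole + 1) 1).map (fun i =>
    (PySem.List.pyRange 0 (pvB_ymax pole - pvB_ymin pole + 1) 1).map (fun j =>
      if (PySem.Set.ofList (pvB_pairs pole)).contains (pvB_xmin pole + i, pvB_ymin pole + j) then
        PySem.List.pyGetD pole 0 0 else 0))

def vytvor_tvar_alt (pole : List Int) : Int × Int × Int × List (List Int) :=
  (PySem.List.pyGetD pole 0 0, PySem.List.len (pvB_mat pole),
   PySem.List.len (PySem.List.pyGetD (pvB_mat pole) 0 []), pvB_mat pole)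

-- ===== PRECONDITION & SPEC =====
-- Python A raises IndexError when pole is empty (pole[0]) or contains no coordinate pair
-- (pole2[0] on an empty pole2, i.e. len(pole) < 3); exactly those inputs are excluded.
def Pre_vytvor_tvar (pole : List Int) : Prop := 3 ≤ pole.length
instance (pole : List Int) : Decidable (Pre_vytvor_tvar pole) := by unfold Pre_vytvor_tvar; infer_instance

def pvWitness_vytvor_tvar : List Int := [5, 0, 0, 1, 2]

def Spec_vytvor_tvar (pole : List Int) (out : Int × Int × Int × List (List Int)) : Prop := out = vytvor_tvar_alt pole
instance (pole : List Int) (out : Int × Int × Int × List (List Int)) : Decidable (Spec_vytvor_tvar pole out) := by unfold Spec_vytvor_tvar; infer_instance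

-- ===== CLAIM (what is proved, stated in full; the proofs are below) =====
def Claim_equal_vytvor_tvar : Prop := ∀ (pole : List Int), Dom_vytvor_tvar pole → Pre_vytvor_tvar pole → Spec_vytvor_tvar pole (vytvor_tvar pole)

-- ===== LEMMAS AND PROOFS =====

-- the two parses agree: appending singletons in a fold is mapping
theorem pv_foldl_append_singleton_eq_map {α β : Type} (f : α → β) (l : List α) (acc : List β) :
    l.foldl (fun acc x => acc ++ [f x]) acc = acc ++ l.map f := by
  induction l generalizing acc with
  | nil => simp
  | cons x t ih => simp [ih]

theorem pv_pairs_eq (pole : List Int) : pvA_pairs pole = pvB_pairs pole := by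
  unfold pvA_pairs pvB_pairs
  rw [pv_foldl_append_singleton_eq_map]
  simp

theorem pv_pairs_ne_nil (pole : List Int) (h : 3 ≤ pole.length) : pvB_pairs pole ≠ [] := by
  unfold pvB_pairs
  rw [PySem.List.slice_from_one]
  simp [PySem.List.pyRange_one, List.range_eq_nil]
  omega

-- generic: insertion with comparator `before` preserves Pairwise S
theorem pv_insertBy_pairwise {α : Type} (before : α → α → Bool) (S : α → α → Prop)
    (h1 : ∀ a b, before a b = true → S a b) (h2 : ∀ a b, before a b = false → S b a)
    (htr : ∀ {a b c}, S a b → S b c → S a c) :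
    ∀ (ys : List α) (x : α), ys.Pairwise S → (PySem.List.insertBy before x ys).Pairwise S := by
  intro ys
  induction ys with
  | nil => intro x _; simp [PySem.List.insertBy]
  | cons y t ih =>
      intro x hp
      rw [List.pairwise_cons] at hp
      by_cases hb : before x y = true
      · rw [PySem.List.insertBy, if_pos hb]
        refine List.Pairwise.cons ?_ (List.pairwise_cons.mpr hp)
        intro z hz
        rcases List.mem_cons.mp hz with rfl | hz
        · exact h1 _ _ hb
        · exact htr (h1 _ _ hb) (hp.1 z hz)
      · rw [PySem.List.insertBy, if_neg hb]
        refine List.Pairwise.cons ?_ (ih x hp.2)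
        intro z hz
        rcases (PySem.List.mem_insertBy before x z t).mp hz with rfl | hz
        · exact h2 _ _ (by simpa using hb)
        · exact hp.1 z hz

theorem pv_foldl_insertBy_pairwise {α : Type} (before : α → α → Bool) (S : α → α → Prop)
    (h1 : ∀ a b, before a b = true → S a b) (h2 : ∀ a b, before a b = false → S b a)
    (htr : ∀ {a b c}, S a b → S b c → S a c) (l : List α) :
    ∀ (acc : List α), acc.Pairwise S →
      (l.foldl (fun acc x => PySem.List.insertBy before x acc) acc).Pairwise S := by
  induction l with
  | nil => intro acc h; simpa using h
  | cons x t ih =>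
      intro acc h
      exact ih _ (pv_insertBy_pairwise before S h1 h2 htr acc x h)

theorem pv_s1_pairwise (pole : List Int) :
    (pvA_s1 pole).Pairwise (fun a b => a.1 ≤ b.1) := by
  unfold pvA_s1 PySem.List.sorted2
  simp only [Bool.false_eq_true, if_false]
  apply pv_foldl_insertBy_pairwise _ _ ?_ ?_ ?_ _ _ List.Pairwise.nil
  · intro a b hb
    simp only [Bool.or_eq_true, Bool.and_eq_true, Bool.not_eq_eq_eq_not, Bool.not_true,
      decide_eq_true_eq, decide_eq_false_iff_not] at hb
    rcases hb with hb | ⟨hb, _⟩ <;> omega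
  · intro a b hb
    simp only [Bool.or_eq_false_iff, Bool.and_eq_false_iff, Bool.not_eq_eq_eq_not, Bool.not_false,
      decide_eq_true_eq, decide_eq_false_iff_not] at hb
    omega
  · intro a b c hab hbc
    omega

-- first and last of a Pairwise-(key ≤) list are extremal
theorem pv_head_min {α : Type} (key : α → Int) (l : List α) (h : l ≠ [])
    (hp : l.Pairwise (fun a b => key a ≤ key b)) : ∀ y ∈ l, key (l.head h) ≤ key y := by
  intro y hy
  obtain ⟨i, hi, rfl⟩ := List.getElem_of_mem hy
  rw [List.head_eq_getElem]
  rcases Nat.eq_zero_or_pos i with rfl | h0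
  · exact le_refl _
  · exact List.pairwise_iff_getElem.mp hp 0 i (by omega) hi h0

theorem pv_last_max {α : Type} (key : α → Int) (l : List α) (h : l ≠ [])
    (hp : l.Pairwise (fun a b => key a ≤ key b)) : ∀ y ∈ l, key y ≤ key (l.getLast h) := by
  intro y hy
  obtain ⟨i, hi, rfl⟩ := List.getElem_of_mem hy
  rw [List.getLast_eq_getElem]
  rcases Nat.lt_or_ge i (l.length - 1) with h0 | h0
  · exact List.pairwise_iff_getElem.mp hp i (l.length - 1) hi (by omega) h0
  · have : i = l.length - 1 := by omega
    subst this
    exact le_refl _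

theorem pv_s1_perm (pole : List Int) : (pvA_s1 pole).Perm (pvB_pairs pole) := by
  rw [← pv_pairs_eq]; exact PySem.List.sorted2_perm _ _ _ _

theorem pv_s2_perm (pole : List Int) : (pvA_s2 pole).Perm (pvB_pairs pole) :=
  (PySem.List.sorted_perm _ _ _).trans (pv_s1_perm pole)

-- the four extremes agree
theorem pv_s1_ne_nil (pole : List Int) (h : 3 ≤ pole.length) : pvA_s1 pole ≠ [] := by
  intro h0
  apply pv_pairs_ne_nil pole h
  have hperm := pv_s1_perm pole
  rw [h0] at hperm
  exact (hperm.symm.eq_nil)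

theorem pv_s2_ne_nil (pole : List Int) (h : 3 ≤ pole.length) : pvA_s2 pole ≠ [] := by
  intro h0
  apply pv_pairs_ne_nil pole h
  have hperm := pv_s2_perm pole
  rw [h0] at hperm
  exact (hperm.symm.eq_nil)

theorem pv_getD_zero_eq_head (l : List (Int × Int)) (h : l ≠ []) :
    PySem.List.pyGetD l 0 (0, 0) = l.head h := by
  cases l with
  | nil => exact absurd rfl h
  | cons m t => simp [PySem.List.pyGetD_zero_cons]

-- A's head-of-lex-sorted x is B's min of the x's (and the three sibling facts)
theorem pv_xmin_eq (pole : List Int) (h : 3 ≤ pole.length) : pvA_xmin pole = pvB_xmin pole := by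
  have hne := pv_pairs_ne_nil pole h
  have hs1 := pv_s1_ne_nil pole h
  have hmemiff := fun q => (pv_s1_perm pole).mem_iff (a := q)
  unfold pvA_xmin pvB_xmin
  rw [pv_getD_zero_eq_head _ hs1]
  have hhead : ∀ y ∈ pvA_s1 pole, ((pvA_s1 pole).head hs1).1 ≤ y.1 :=
    pv_head_min (fun p => p.1) _ hs1 (pv_s1_pairwise pole)
  cases hmin : PySem.List.min? ((pvB_pairs pole).map (fun p => p.1)) (fun v => v) with
  | none =>
      rw [PySem.List.min?_eq_none_iff] at hmin
      simp only [List.map_eq_nil_iff] at hmin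
      exact absurd hmin hne
  | some v =>
      simp only [Option.getD_some]
      have hvmem := PySem.List.min?_mem hmin
      obtain ⟨p, hpmem, rfl⟩ := List.mem_map.mp hvmem
      have h1 : ((pvA_s1 pole).head hs1).1 ≤ p.1 := hhead p ((hmemiff p).mpr hpmem)
      have h2 : p.1 ≤ ((pvA_s1 pole).head hs1).1 :=
        PySem.List.min?_isMin hmin _ (List.mem_map.mpr
          ⟨(pvA_s1 pole).head hs1, (hmemiff _).mp (List.head_mem hs1), rfl⟩)
      omega

theorem pv_xmax_eq (pole : List Int) (h : 3 ≤ pole.length) : pvA_xmax pole = pvB_xmax pole := by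
  have hne := pv_pairs_ne_nil pole h
  have hs1 := pv_s1_ne_nil pole h
  have hmemiff := fun q => (pv_s1_perm pole).mem_iff (a := q)
  unfold pvA_xmax pvB_xmax
  rw [PySem.List.pyGetD_neg_one _ _ hs1]
  have hlast : ∀ y ∈ pvA_s1 pole, y.1 ≤ ((pvA_s1 pole).getLast hs1).1 :=
    pv_last_max (fun p => p.1) _ hs1 (pv_s1_pairwise pole)
  cases hmax : PySem.List.max? ((pvB_pairs pole).map (fun p => p.1)) (fun v => v) with
  | none =>
      rw [PySem.List.max?_eq_none_iff] at hmax
      simp only [List.map_eq_nil_iff] at hmax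
      exact absurd hmax hne
  | some v =>
      simp only [Option.getD_some]
      have hvmem := PySem.List.max?_mem hmax
      obtain ⟨p, hpmem, rfl⟩ := List.mem_map.mp hvmem
      have h1 : p.1 ≤ ((pvA_s1 pole).getLast hs1).1 := hlast p ((hmemiff p).mpr hpmem)
      have h2 : ((pvA_s1 pole).getLast hs1).1 ≤ p.1 :=
        PySem.List.max?_isMax hmax _ (List.mem_map.mpr
          ⟨(pvA_s1 pole).getLast hs1, (hmemiff _).mp (List.getLast_mem hs1), rfl⟩)
      omega

theorem pv_ymin_eq (pole : List Int) (h : 3 ≤ pole.length) : pvA_ymin pole = pvB_ymin pole := by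
  have hne := pv_pairs_ne_nil pole h
  have hs2 := pv_s2_ne_nil pole h
  have hmemiff := fun q => (pv_s2_perm pole).mem_iff (a := q)
  unfold pvA_ymin pvB_ymin
  rw [pv_getD_zero_eq_head _ hs2]
  have hhead : ∀ y ∈ pvA_s2 pole, ((pvA_s2 pole).head hs2).2 ≤ y.2 :=
    pv_head_min (fun p => p.2) _ hs2 (PySem.List.sorted_pairwise _ _)
  cases hmin : PySem.List.min? ((pvB_pairs pole).map (fun p => p.2)) (fun v => v) with
  | none =>
      rw [PySem.List.min?_eq_none_iff] at hmin
      simp only [List.map_eq_nil_iff] at hmin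
      exact absurd hmin hne
  | some v =>
      simp only [Option.getD_some]
      have hvmem := PySem.List.min?_mem hmin
      obtain ⟨p, hpmem, rfl⟩ := List.mem_map.mp hvmem
      have h1 : ((pvA_s2 pole).head hs2).2 ≤ p.2 := hhead p ((hmemiff p).mpr hpmem)
      have h2 : p.2 ≤ ((pvA_s2 pole).head hs2).2 :=
        PySem.List.min?_isMin hmin _ (List.mem_map.mpr
          ⟨(pvA_s2 pole).head hs2, (hmemiff _).mp (List.head_mem hs2), rfl⟩)
      omega

theorem pv_ymax_eq (pole : List Int) (h : 3 ≤ pole.length) : pvA_ymax pole = pvB_ymax pole := by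
  have hne := pv_pairs_ne_nil pole h
  have hs2 := pv_s2_ne_nil pole h
  have hmemiff := fun q => (pv_s2_perm pole).mem_iff (a := q)
  unfold pvA_ymax pvB_ymax
  rw [PySem.List.pyGetD_neg_one _ _ hs2]
  have hlast : ∀ y ∈ pvA_s2 pole, y.2 ≤ ((pvA_s2 pole).getLast hs2).2 :=
    pv_last_max (fun p => p.2) _ hs2 (PySem.List.sorted_pairwise _ _)
  cases hmax : PySem.List.max? ((pvB_pairs pole).map (fun p => p.2)) (fun v => v) with
  | none =>
      rw [PySem.List.max?_eq_none_iff] at hmax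
      simp only [List.map_eq_nil_iff] at hmax
      exact absurd hmax hne
  | some v =>
      simp only [Option.getD_some]
      have hvmem := PySem.List.max?_mem hmax
      obtain ⟨p, hpmem, rfl⟩ := List.mem_map.mp hvmem
      have h1 : p.2 ≤ ((pvA_s2 pole).getLast hs2).2 := hlast p ((hmemiff p).mpr hpmem)
      have h2 : ((pvA_s2 pole).getLast hs2).2 ≤ p.2 :=
        PySem.List.max?_isMax hmax _ (List.mem_map.mpr
          ⟨(pvA_s2 pole).getLast hs2, (hmemiff _).mp (List.getLast_mem hs2), rfl⟩)
      omega

-- every point lies in A's bounding box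
theorem pv_bounds (pole : List Int) (h : 3 ≤ pole.length) :
    ∀ p ∈ pvA_s2 pole, pvA_xmin pole ≤ p.1 ∧ p.1 ≤ pvA_xmax pole ∧
      pvA_ymin pole ≤ p.2 ∧ p.2 ≤ pvA_ymax pole := by
  intro p hp
  have hs1 := pv_s1_ne_nil pole h
  have hs2 := pv_s2_ne_nil pole h
  have hp1 : p ∈ pvA_s1 pole := (PySem.List.mem_sorted _ _ _ _).mp hp
  refine ⟨?_, ?_, ?_, ?_⟩
  · unfold pvA_xmin
    rw [pv_getD_zero_eq_head _ hs1]
    exact pv_head_min (fun q => q.1) _ hs1 (pv_s1_pairwise pole) p hp1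
  · unfold pvA_xmax
    rw [PySem.List.pyGetD_neg_one _ _ hs1]
    exact pv_last_max (fun q => q.1) _ hs1 (pv_s1_pairwise pole) p hp1
  · unfold pvA_ymin
    rw [pv_getD_zero_eq_head _ hs2]
    exact pv_head_min (fun q => q.2) _ hs2 (PySem.List.sorted_pairwise _ _) p hp
  · unfold pvA_ymax
    rw [PySem.List.pyGetD_neg_one _ _ hs2]
    exact pv_last_max (fun q => q.2) _ hs2 (PySem.List.sorted_pairwise _ _) p hp

-- the canonical "gather" matrix both sides are shown equal to
def pvGrid (barva xmin ymin : Int) (Xn Yn : Nat) (P : Int × Int → Bool) : List (List Int) :=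
  (List.range Xn).map (fun (i : Nat) =>
    (List.range Yn).map (fun (j : Nat) => if P (xmin + (i : Int), ymin + (j : Int)) then barva else 0))

theorem pv_grid_getElem (barva xmin ymin : Int) (Xn Yn : Nat) (P : Int × Int → Bool) (i : Nat)
    (hi : i < (pvGrid barva xmin ymin Xn Yn P).length) :
    (pvGrid barva xmin ymin Xn Yn P)[i]
      = (List.range Yn).map (fun (j : Nat) =>
          if P (xmin + (i : Int), ymin + (j : Int)) then barva else 0) := by
  simp only [pvGrid, List.getElem_map, List.getElem_range]

theorem pv_grid_congr (barva xmin ymin : Int) (Xn Yn : Nat) (P Q : Int × Int → Bool)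
    (h : ∀ q, P q = Q q) : pvGrid barva xmin ymin Xn Yn P = pvGrid barva xmin ymin Xn Yn Q := by
  have : P = Q := funext h
  rw [this]

theorem pv_grid_zero (barva xmin ymin X Y : Int) :
    (PySem.List.pyRange 0 X 1).map (fun _ => (PySem.List.pyRange 0 Y 1).map (fun _ => (0 : Int)))
      = pvGrid barva xmin ymin X.toNat Y.toNat (fun _ => false) := by
  unfold pvGrid
  simp [PySem.List.pyRange_one, Function.comp_def, List.map_const', List.length_range]

theorem pv_grid_step (barva xmin ymin xmax ymax : Int) (P : Int × Int → Bool) (p : Int × Int)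
    (hx1 : xmin ≤ p.1) (hx2 : p.1 ≤ xmax) (hy1 : ymin ≤ p.2) (hy2 : p.2 ≤ ymax) :
    PySem.List.pySetD (pvGrid barva xmin ymin (xmax - xmin + 1).toNat (ymax - ymin + 1).toNat P)
        (p.1 - xmin)
        (PySem.List.pySetD
          (PySem.List.pyGetD (pvGrid barva xmin ymin (xmax - xmin + 1).toNat (ymax - ymin + 1).toNat P)
            (p.1 - xmin) []) (p.2 - ymin) barva)
      = pvGrid barva xmin ymin (xmax - xmin + 1).toNat (ymax - ymin + 1).toNat
          (fun q => q == p || P q) := by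
  have hXn : (p.1 - xmin).toNat < (xmax - xmin + 1).toNat := by omega
  have hYn : (p.2 - ymin).toNat < (ymax - ymin + 1).toNat := by omega
  have hlen : (pvGrid barva xmin ymin (xmax - xmin + 1).toNat (ymax - ymin + 1).toNat P).length
      = (xmax - xmin + 1).toNat := by simp [pvGrid]
  rw [PySem.List.pyGetD_eq_getElem _ _ (by omega) (by rw [hlen]; omega),
      PySem.List.pySetD_of_nonneg _ _ (by omega : (0:Int) ≤ p.2 - ymin),
      PySem.List.pySetD_of_nonneg _ _ (by omega : (0:Int) ≤ p.1 - xmin),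
      pv_grid_getElem _ _ _ _ _ _ _ (by rw [hlen]; exact hXn)]
  apply List.ext_getElem
  · simp [pvGrid]
  · intro i h1 h2
    rw [pv_grid_getElem _ _ _ _ _ _ _ h2]
    by_cases hi : i = (p.1 - xmin).toNat
    · subst hi
      rw [List.getElem_set_self (by rw [List.length_set, hlen]; exact hXn)]
      apply List.ext_getElem
      · simp
      · intro j j1 j2
        simp only [List.getElem_map, List.getElem_range] at j2 ⊢
        rw [List.length_set, List.length_map, List.length_range] at j1
        by_cases hj : j = (p.2 - ymin).toNat
        · subst hj
          rw [List.getElem_set_self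
                (by rw [List.length_set, List.length_map, List.length_range]; exact hYn)]
          have hq : ((xmin + ((p.1 - xmin).toNat : Int),
              ymin + ((p.2 - ymin).toNat : Int)) == p) = true := by
            simp only [beq_iff_eq, Prod.ext_iff]
            constructor <;> omega
          rw [hq]
          simp
        · rw [List.getElem_set_ne (fun he => hj he.symm), List.getElem_map, List.getElem_range]
          have hq : ((xmin + ((p.1 - xmin).toNat : Int), ymin + (j : Int)) == p) = false := by
            simp only [beq_eq_false_iff_ne, ne_eq, Prod.ext_iff, not_and]
            intro _ hy
            omega
          rw [hq]
          simp
    · rw [List.getElem_set_ne (fun he => hi he.symm),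
          pv_grid_getElem _ _ _ _ _ _ _ (by rw [hlen]; rw [List.length_set, hlen] at h1; exact h1)]
      apply List.map_congr_left
      intro j hj
      have hq : ((xmin + (i : Int), ymin + (j : Int)) == p) = false := by
        simp only [beq_eq_false_iff_ne, ne_eq, Prod.ext_iff, not_and]
        intro hx
        omega
      rw [hq]
      simp

theorem pv_grid_fold (barva xmin ymin xmax ymax : Int) (l : List (Int × Int))
    (hl : ∀ p ∈ l, xmin ≤ p.1 ∧ p.1 ≤ xmax ∧ ymin ≤ p.2 ∧ p.2 ≤ ymax) (P : Int × Int → Bool) :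
    l.foldl (fun m p =>
        PySem.List.pySetD m (p.1 - xmin)
          (PySem.List.pySetD (PySem.List.pyGetD m (p.1 - xmin) []) (p.2 - ymin) barva))
      (pvGrid barva xmin ymin (xmax - xmin + 1).toNat (ymax - ymin + 1).toNat P)
      = pvGrid barva xmin ymin (xmax - xmin + 1).toNat (ymax - ymin + 1).toNat
          (fun q => l.contains q || P q) := by
  induction l generalizing P with
  | nil => simp
  | cons p t ih =>
      have hp := hl p (by simp)
      have ht : ∀ q ∈ t, xmin ≤ q.1 ∧ q.1 ≤ xmax ∧ ymin ≤ q.2 ∧ q.2 ≤ ymax := by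
        intro q hq; exact hl q (by simp [hq])
      simp only [List.foldl_cons]
      rw [pv_grid_step barva xmin ymin xmax ymax P p hp.1 hp.2.1 hp.2.2.1 hp.2.2.2, ih ht]
      apply pv_grid_congr
      intro q
      rw [List.contains_cons]
      cases hq : (q == p) <;> cases hc : t.contains q <;> simp [hq, hc]

theorem pv_pyRange_grid (barva xmin ymin X Y : Int) (P : Int × Int → Bool) :
    (PySem.List.pyRange 0 X 1).map (fun i =>
        (PySem.List.pyRange 0 Y 1).map (fun j => if P (xmin + i, ymin + j) then barva else 0))
      = pvGrid barva xmin ymin X.toNat Y.toNat P := by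
  unfold pvGrid
  simp [PySem.List.pyRange_one]

theorem pv_mat_eq (pole : List Int) (h : 3 ≤ pole.length) : pvA_mat pole = pvB_mat pole := by
  unfold pvA_mat pvA_mat0
  rw [pv_grid_zero (PySem.List.pyGetD pole 0 0) (pvA_xmin pole) (pvA_ymin pole)
        (pvA_xmax pole - pvA_xmin pole + 1) (pvA_ymax pole - pvA_ymin pole + 1),
      pv_grid_fold (PySem.List.pyGetD pole 0 0) (pvA_xmin pole) (pvA_ymin pole)
        (pvA_xmax pole) (pvA_ymax pole) (pvA_s2 pole) (pv_bounds pole h)]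
  unfold pvB_mat
  rw [← pv_xmin_eq pole h, ← pv_xmax_eq pole h, ← pv_ymin_eq pole h, ← pv_ymax_eq pole h,
      pv_pyRange_grid]
  apply pv_grid_congr
  intro q
  rw [Bool.or_false, Bool.eq_iff_iff]
  simp [List.contains_iff_mem, PySem.Set.mem_ofList, (pv_s2_perm pole).mem_iff]

-- ===== VERDICT (by name: the statement is the Claim_ definition above) =====
theorem vytvor_tvar_spec : Claim_equal_vytvor_tvar := by
  intro pole _hd hpre
  unfold Spec_vytvor_tvar vytvor_tvar vytvor_tvar_alt
  rw [pv_mat_eq pole hpre]
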